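-- pv_equiv track=rewrite | github.com/sungjun-singer/codingTest | 이전코테/2164.py | solution
-- ===== SOURCE A (Python) =====
-- from queue import Queue
--
-- def solution(n):
--     if n == 1:
--         return 1
--     q = Queue()
--
--     for i in range(1, n+1):
--         q.put(i)
--
--     while q:
--         q.get()
--
--         if q.qsize() == 1:
--             return q.get()
--         x = q.get()
--         q.put(x)
-- ===== SOURCE B (Python) =====
-- def solution(n):
--     # closed form: with L the largest power of 2 <= n, the survivor is
--     # n itself when n is that power, else 2*(n-L)
--     L = 1 << (n.bit_length() - 1)
--     return n if n == L else 2 * (n - L)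
-- ===== Notes on version B (the rewrite author's own statement) =====
-- stated objective: faster
-- what changed: Replaces the linear-time queue simulation with the closed form: with L the largest power of two not exceeding n, the survivor is n itself when n equals L and twice the excess n-L otherwise. Pre_ excludes nonpositive n, where A blocks forever on Queue.get of an empty queue.
-- outside the precondition, e.g. on solution(0): A does not finish within the time limit, B raises ValueError
import Mathlib
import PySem

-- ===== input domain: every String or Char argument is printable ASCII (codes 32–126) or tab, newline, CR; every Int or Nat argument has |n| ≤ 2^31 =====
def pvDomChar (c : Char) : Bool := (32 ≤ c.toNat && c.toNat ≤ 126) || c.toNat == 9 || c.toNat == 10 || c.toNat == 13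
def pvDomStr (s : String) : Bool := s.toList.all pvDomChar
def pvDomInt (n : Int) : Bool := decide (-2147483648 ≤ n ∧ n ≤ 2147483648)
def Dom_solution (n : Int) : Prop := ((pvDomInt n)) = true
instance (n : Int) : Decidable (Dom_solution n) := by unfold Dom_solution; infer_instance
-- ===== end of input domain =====

-- B replaces A's O(n) one-card-per-iteration queue simulation by the closed form
-- (largest power of 2 ≤ n); equivalence proved for all n ≥ 1 (Pre_ excludes n ≤ 0,
-- where A blocks forever on Queue.get of an empty queue).

-- ===== PORT A =====
-- the while-loop: discard the front card; if one card remains return it,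
-- else move the next card to the back.  An empty/singleton queue never occurs
-- under Pre_ (Python would block there); the port returns 0 in those cases.
def solutionLoop : List Int → Int
  | [] => 0
  | [_] => 0
  | _ :: b :: rest =>
    if rest.length = 0 then b
    else solutionLoop (rest ++ [b])
termination_by q => q.length
decreasing_by simp only [List.length_append, List.length_cons, List.length_nil]; omega

def solution (n : Int) : Int :=
  if n = 1 then 1
  else solutionLoop (PySem.List.pyRange 1 (n + 1) 1)

-- ===== PORT B =====
-- n.bit_length() for n ≥ 1 (number of binary digits of |n|); exact on Nat
def bitLen (n : Nat) : Nat := if n = 0 then 0 else Nat.log2 n + 1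

def solution_alt (n : Int) : Int :=
  let L : Int := 2 ^ (bitLen n.natAbs - 1)
  if n = L then n else 2 * (n - L)

-- ===== PRECONDITION & SPEC =====
-- A blocks forever (Queue.get on an empty queue) for every n ≤ 0; those inputs are excluded.
def Pre_solution (n : Int) : Prop := 1 ≤ n
instance (n : Int) : Decidable (Pre_solution n) := by unfold Pre_solution; infer_instance
def pvWitness_solution : Int := 6

def Spec_solution (n : Int) (out : Int) : Prop := out = solution_alt n
instance (n : Int) (out : Int) : Decidable (Spec_solution n out) := by unfold Spec_solution; infer_instance

-- ===== CLAIM (what is proved, stated in full; the proofs are below) =====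
def Claim_equal_solution : Prop := ∀ (n : Int), Dom_solution n → Pre_solution n → Spec_solution n (solution n)

-- ===== LEMMAS AND PROOFS =====

-- 0-based index of the surviving card in a queue of length m (for m ≥ 2)
def josIdx : Nat → Nat
  | 0 => 0
  | 1 => 0
  | 2 => 1
  | m + 3 => if josIdx (m + 2) = m + 1 then 1 else josIdx (m + 2) + 2

-- largest power of two ≤ m, and the closed-form 0-based index
def pow2le (m : Nat) : Nat := 2 ^ (bitLen m - 1)
def closedIdx (m : Nat) : Nat := if m = pow2le m then m - 1 else 2 * (m - pow2le m) - 1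

theorem pow2le_bounds (m : Nat) (h : 1 ≤ m) : pow2le m ≤ m ∧ m < 2 * pow2le m := by
  unfold pow2le bitLen
  rw [if_neg (by omega)]
  simp only [Nat.add_sub_cancel]
  refine ⟨Nat.log2_self_le (by omega), ?_⟩
  have := Nat.lt_log2_self (n := m)
  calc m < 2 ^ (Nat.log2 m + 1) := this
  _ = 2 * 2 ^ Nat.log2 m := by ring

theorem log2_unique (k m : Nat) (h1 : 2 ^ k ≤ m) (h2 : m < 2 ^ (k + 1)) : Nat.log2 m = k := by
  have hk1 : 1 ≤ 2 ^ k := Nat.one_le_two_pow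
  have hm : m ≠ 0 := by omega
  rcases Nat.lt_trichotomy (Nat.log2 m) k with h | h | h
  · have : m < 2 ^ k := lt_of_lt_of_le (Nat.lt_log2_self (n := m))
      (Nat.pow_le_pow_right (by omega) (by omega))
    omega
  · exact h
  · have : 2 ^ (k + 1) ≤ m := le_trans (Nat.pow_le_pow_right (by omega) (by omega))
      (Nat.log2_self_le hm)
    omega

theorem pow2le_eq (k m : Nat) (h1 : 2 ^ k ≤ m) (h2 : m < 2 ^ (k + 1)) : pow2le m = 2 ^ k := by
  have hk1 : 1 ≤ 2 ^ k := Nat.one_le_two_pow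
  unfold pow2le bitLen
  rw [if_neg (by omega), log2_unique k m h1 h2]
  simp

-- one step of the closed form: it satisfies josIdx's recurrence
theorem closedIdx_step (p : Nat) (h : 2 ≤ p) :
    closedIdx (p + 1) = if closedIdx p = p - 1 then 1 else closedIdx p + 2 := by
  obtain ⟨hL1, hL2⟩ := pow2le_bounds p (by omega)
  have hLeq : pow2le p = 2 ^ (bitLen p - 1) := rfl
  rw [hLeq] at hL1 hL2
  have hpk : (2 : Nat) ^ (bitLen p - 1 + 1) = 2 * 2 ^ (bitLen p - 1) := by ring
  by_cases hpow : p = 2 ^ (bitLen p - 1)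
  · -- p is a power of 2: closedIdx p = p - 1, reset to 1
    have hcp : closedIdx p = p - 1 := by
      unfold closedIdx; rw [hLeq, if_pos hpow]
    have hP1 : pow2le (p + 1) = 2 ^ (bitLen p - 1) :=
      pow2le_eq _ _ (by omega) (by rw [hpk]; omega)
    have hcp1 : closedIdx (p + 1) = 1 := by
      unfold closedIdx; rw [hP1, if_neg (by omega)]; omega
    rw [hcp1, hcp, if_pos rfl]
  · -- p is strictly between two powers of 2
    have hcp : closedIdx p = 2 * (p - 2 ^ (bitLen p - 1)) - 1 := by
      unfold closedIdx; rw [hLeq, if_neg hpow]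
    have hne : closedIdx p ≠ p - 1 := by rw [hcp]; omega
    rw [if_neg hne, hcp]
    by_cases hnext : p + 1 = 2 ^ (bitLen p - 1 + 1)
    · -- p + 1 is the next power of 2
      have hP1 : pow2le (p + 1) = 2 ^ (bitLen p - 1 + 1) := by
        refine pow2le_eq _ _ (by omega) ?_
        have : (2:Nat) ^ (bitLen p - 1 + 1 + 1) = 2 * 2 ^ (bitLen p - 1 + 1) := by ring
        omega
      have : closedIdx (p + 1) = p := by
        unfold closedIdx; rw [hP1, if_pos hnext]; omega
      rw [this]; omega
    · -- same leading power of 2 for p + 1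
      have hP1 : pow2le (p + 1) = 2 ^ (bitLen p - 1) :=
        pow2le_eq _ _ (by omega) (by omega)
      have : closedIdx (p + 1) = 2 * (p + 1 - 2 ^ (bitLen p - 1)) - 1 := by
        unfold closedIdx; rw [hP1, if_neg (by omega)]
      rw [this]; omega

-- bounds on josIdx, needed for the indexing argument
theorem josIdx_bounds (m : Nat) (h : 2 ≤ m) : 1 ≤ josIdx m ∧ josIdx m ≤ m - 1 := by
  induction m using Nat.strong_induction_on with
  | _ m ih =>
    match m, h with
    | 2, _ => exact ⟨le_refl _, le_refl _⟩
    | m + 3, _ =>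
      have := ih (m + 2) (by omega) (by omega)
      rw [josIdx]
      split <;> omega

-- josIdx equals the closed form
theorem josIdx_eq_closedIdx (m : Nat) (h : 2 ≤ m) : josIdx m = closedIdx m := by
  induction m using Nat.strong_induction_on with
  | _ m ih =>
    match m, h with
    | 2, _ =>
      have : closedIdx 2 = 1 := by
        unfold closedIdx
        rw [pow2le_eq 1 2 (by norm_num) (by norm_num)]
        norm_num
      rw [this]; rfl
    | m + 3, _ =>
      have ihm := ih (m + 2) (by omega) (by omega)
      rw [josIdx, ihm, closedIdx_step (m + 2) (by omega)]
      norm_num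

-- josIdx's recurrence with the argument written as m, m - 1
theorem josIdx_succ (m : Nat) (h : 3 ≤ m) :
    josIdx m = if josIdx (m - 1) = m - 2 then 1 else josIdx (m - 1) + 2 := by
  match m, h with
  | k + 3, _ => rfl

-- the loop returns the card at index josIdx m of the current queue (m = its length)
theorem solutionLoop_getD (m : Nat) (q : List Int) (hm : q.length = m) (h : 2 ≤ m) :
    solutionLoop q = q.getD (josIdx m) 0 := by
  induction m using Nat.strong_induction_on generalizing q with
  | _ m ih =>
    match q with
    | [] => simp at hm; omega
    | [_] => simp at hm; omega
    | a :: b :: rest =>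
      by_cases hrest : rest.length = 0
      · -- two cards left: discard a, return b
        have hr : rest = [] := List.length_eq_zero_iff.mp hrest
        subst hr
        have hm2 : m = 2 := by simp at hm; omega
        subst hm2
        rw [solutionLoop, if_pos hrest]
        rfl
      · have hr1 : 1 ≤ rest.length := by omega
        have hmr : m = rest.length + 2 := by simp at hm; omega
        have hlen' : (rest ++ [b]).length = m - 1 := by simp; omega
        rw [solutionLoop, if_neg hrest]
        rw [ih (m - 1) (by omega) (rest ++ [b]) hlen' (by omega)]
        obtain ⟨hj1, hj2⟩ := josIdx_bounds (m - 1) (by omega)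
        rw [josIdx_succ m (by omega)]
        by_cases hcase : josIdx (m - 1) = m - 2
        · -- survivor is the moved card b
          rw [if_pos hcase, hcase, show m - 2 = rest.length from by omega,
              List.getD_append_right _ _ _ _ (le_refl _)]
          simp
        · rw [if_neg hcase]
          rw [List.getD_append _ _ _ _ (by omega)]
          simp [List.getD]

theorem pyRange_getD (n : Int) (i : Nat) (h : (i : Int) < n) :
    (PySem.List.pyRange 1 (n + 1) 1).getD i 0 = (i : Int) + 1 := by
  rw [PySem.List.pyRange_one]
  have hi : i < (n + 1 - 1).toNat := by omega
  rw [List.getD_eq_getElem _ _ (by simpa using hi)]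
  simp [add_comm]

-- solution_alt in terms of the Nat closed form
theorem solution_alt_closed (n : Int) (h : 1 ≤ n) :
    solution_alt n = ((closedIdx n.toNat : Nat) : Int) + 1 := by
  have hna : n.natAbs = n.toNat := by omega
  obtain ⟨hb1, hb2⟩ := pow2le_bounds n.toNat (by omega)
  have hL : (2 : Int) ^ (bitLen n.natAbs - 1) = ((pow2le n.toNat : Nat) : Int) := by
    rw [hna]; unfold pow2le; push_cast; ring
  show (if n = (2 : Int) ^ (bitLen n.natAbs - 1)
        then n else 2 * (n - (2 : Int) ^ (bitLen n.natAbs - 1))) = _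
  rw [hL]
  by_cases hp : n.toNat = pow2le n.toNat
  · have heq : n = ((pow2le n.toNat : Nat) : Int) := by omega
    rw [if_pos heq]
    unfold closedIdx; rw [if_pos hp]; omega
  · have hne : n ≠ ((pow2le n.toNat : Nat) : Int) := by omega
    rw [if_neg hne]
    unfold closedIdx; rw [if_neg hp]
    omega

-- ===== VERDICT (by name: the statement is the Claim_ definition above) =====
theorem solution_spec : Claim_equal_solution := by
  intro n _ hpre
  unfold Spec_solution solution
  have h1 : (1 : Int) ≤ n := hpre
  by_cases hone : n = 1
  · subst hone
    have hl : Nat.log2 1 = 0 := by rw [Nat.log2]; decide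
    norm_num [solution_alt, bitLen, hl]
  · rw [if_neg hone]
    have hn2 : 2 ≤ n := by omega
    have hlen : 2 ≤ (PySem.List.pyRange 1 (n + 1) 1).length := by
      rw [PySem.List.length_pyRange_one]; omega
    have hlen2 : (PySem.List.pyRange 1 (n + 1) 1).length = n.toNat := by
      rw [PySem.List.length_pyRange_one]; omega
    rw [solutionLoop_getD n.toNat _ hlen2 (by omega)]
    obtain ⟨hj1, hj2⟩ := josIdx_bounds n.toNat (by omega)
    rw [pyRange_getD n (josIdx n.toNat) (by omega),
        josIdx_eq_closedIdx n.toNat (by omega), solution_alt_closed n h1]
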